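-- pv_equiv track=rewrite | github.com/miliar/Code_Jam_Webscraper | solutions_python/solutions_year11_round0_nr1/158.py | solve
-- ===== SOURCE A (Python) =====
-- def solve(param, input):
--     ans = []
--
--     for iput in input:
--         aOsec = 0
--         aBsec = 0
--         sec = 0
--         Osec = 0
--         Bsec = 0
--         Opos = 1
--         Bpos = 1
--         r = -1
--         Lastmove = None
--         for i in iput:
--             if i == 'O':
--                 r = 0
--             elif i == 'B':
--                 r = 1
--             elif r == 0:
--                 Odes = int(i)
--                 Osec = abs(Odes - Opos)
--                 Opos = Odes
--                 if Lastmove == 'B':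
--                     if aBsec > Osec:
--                         Osec = 0
--                     else:
--                         Osec -= aBsec
--                     aBsec = 0
--                 aOsec += (Osec + 1)
--                 sec += (Osec + 1)
--                 Lastmove = 'O'
--             elif r == 1:
--                 Bdes = int(i)
--                 Bsec = abs(Bdes - Bpos)
--                 Bpos = Bdes
--                 if Lastmove == 'O':
--                     if aOsec > Bsec:
--                         Bsec = 0
--                     else:
--                         Bsec -= aOsec
--                     aOsec = 0
--                 aBsec += (Bsec + 1)
--                 sec += (Bsec + 1)
--                 Lastmove = 'B'
--         ans.append(sec)
--     return ans
-- ===== SOURCE B (Python) =====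
-- def solve(param, input):
--     ans = []
--     for moves in input:
--         t = oready = bready = 0
--         opos = bpos = 1
--         color = None
--         for tok in moves:
--             if tok == 'O' or tok == 'B':
--                 color = tok
--             elif color is not None:
--                 p = int(tok)
--                 if color == 'O':
--                     t = max(oready + abs(p - opos), t) + 1
--                     oready, opos = t, p
--                 else:
--                     t = max(bready + abs(p - bpos), t) + 1
--                     bready, bpos = t, p
--         ans.append(t)
--     return ans
-- ===== Notes on version B (the rewrite author's own statement) =====
-- stated objective: simpler
-- what changed: A tracks per-robot accumulated busy times (aOsec/aBsec) and a Lastmove flag and conditionally subtracts one robot's accumulated time from the other's travel time; B keeps only the last press time and each robot's ready time and position, computing each press directly as max(ready + distance, t) + 1.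
import Mathlib
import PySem

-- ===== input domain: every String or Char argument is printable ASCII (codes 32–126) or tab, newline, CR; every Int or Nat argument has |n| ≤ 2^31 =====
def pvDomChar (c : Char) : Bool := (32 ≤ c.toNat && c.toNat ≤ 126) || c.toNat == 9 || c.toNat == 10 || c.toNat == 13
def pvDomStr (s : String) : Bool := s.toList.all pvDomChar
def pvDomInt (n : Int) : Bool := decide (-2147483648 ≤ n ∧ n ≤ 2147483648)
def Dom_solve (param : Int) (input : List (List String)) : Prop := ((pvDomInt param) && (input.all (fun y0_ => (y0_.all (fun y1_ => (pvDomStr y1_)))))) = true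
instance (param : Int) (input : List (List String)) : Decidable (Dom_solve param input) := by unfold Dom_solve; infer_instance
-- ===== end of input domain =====

-- B replaces A's accumulated-idle-time bookkeeping (aOsec/aBsec/Lastmove with conditional
-- subtraction) by the direct press-time formula t = max(ready + distance, t) + 1; simpler.

-- ===== PORT A =====
-- A's loop state per test case; Osec/Bsec kept as state fields as in the Python.
structure PvStA where
  aOsec : Int
  aBsec : Int
  sec : Int
  Osec : Int
  Bsec : Int
  Opos : Int
  Bpos : Int
  r : Int
  last : Option String
deriving Repr, DecidableEq

-- one iteration of A's inner loop; `none` = the Python raises (int(i) fails)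
def pvStepA (st : PvStA) (i : String) : Option PvStA :=
  if i = "O" then some { st with r := 0 }
  else if i = "B" then some { st with r := 1 }
  else if st.r = 0 then
    match PySem.Int.ofStr? i with
    | none => none
    | some odes =>
      let osec0 := |odes - st.Opos|
      if st.last = some "B" then
        let osec := if st.aBsec > osec0 then 0 else osec0 - st.aBsec
        some { st with
                 Osec := osec
                 Opos := odes
                 aBsec := 0
                 aOsec := st.aOsec + (osec + 1)
                 sec := st.sec + (osec + 1)
                 last := some "O" }
      else
        some { st with
                 Osec := osec0
                 Opos := odes
                 aOsec := st.aOsec + (osec0 + 1)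
                 sec := st.sec + (osec0 + 1)
                 last := some "O" }
  else if st.r = 1 then
    match PySem.Int.ofStr? i with
    | none => none
    | some bdes =>
      let bsec0 := |bdes - st.Bpos|
      if st.last = some "O" then
        let bsec := if st.aOsec > bsec0 then 0 else bsec0 - st.aOsec
        some { st with
                 Bsec := bsec
                 Bpos := bdes
                 aOsec := 0
                 aBsec := st.aBsec + (bsec + 1)
                 sec := st.sec + (bsec + 1)
                 last := some "B" }
      else
        some { st with
                 Bsec := bsec0
                 Bpos := bdes
                 aBsec := st.aBsec + (bsec0 + 1)
                 sec := st.sec + (bsec0 + 1)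
                 last := some "B" }
  else some st

def pvInitA : PvStA :=
  { aOsec := 0, aBsec := 0, sec := 0, Osec := 0, Bsec := 0, Opos := 1, Bpos := 1, r := -1, last := none }

def pvRunA (iput : List String) : Option PvStA :=
  iput.foldl (fun acc i => acc.bind (fun st => pvStepA st i)) (some pvInitA)

def solve (param : Int) (input : List (List String)) : List Int :=
  input.map (fun iput => match pvRunA iput with
    | some st => st.sec
    | none => 0)   -- unreachable under Pre_solve (the Python raises ValueError there)

-- ===== PORT B =====
structure PvStB where
  t : Int
  oready : Int
  bready : Int
  opos : Int
  bpos : Int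
  color : Option String
deriving Repr, DecidableEq

-- one iteration of B's inner loop; `none` = int(tok) fails (B raises too)
def pvStepB (st : PvStB) (tok : String) : Option PvStB :=
  if tok = "O" ∨ tok = "B" then some { st with color := some tok }
  else match st.color with
  | none => some st
  | some c =>
    match PySem.Int.ofStr? tok with
    | none => none
    | some p =>
      if c = "O" then
        let t' := max (st.oready + |p - st.opos|) st.t + 1
        some { st with t := t', oready := t', opos := p }
      else
        let t' := max (st.bready + |p - st.bpos|) st.t + 1
        some { st with t := t', bready := t', bpos := p }

def pvInitB : PvStB := { t := 0, oready := 0, bready := 0, opos := 1, bpos := 1, color := none }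

def pvRunB (moves : List String) : Option PvStB :=
  moves.foldl (fun acc tok => acc.bind (fun st => pvStepB st tok)) (some pvInitB)

def solve_alt (param : Int) (input : List (List String)) : List Int :=
  input.map (fun moves => match pvRunB moves with
    | some st => st.t
    | none => 0)

-- ===== PRECONDITION & SPEC =====
-- Pre_ excludes exactly the inputs on which the Python raises ValueError: a token that is
-- neither "O" nor "B", occurs after some "O"/"B" token, and is not int()-parseable.
def Pre_solve (param : Int) (input : List (List String)) : Prop :=
  ∀ row ∈ input, ∀ j : Fin row.length,
    (∃ k : Fin row.length, k.val < j.val ∧ (row.get k = "O" ∨ row.get k = "B")) →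
    (row.get j = "O" ∨ row.get j = "B" ∨ (PySem.Int.ofStr? (row.get j)).isSome)
instance (param : Int) (input : List (List String)) : Decidable (Pre_solve param input) := by
  unfold Pre_solve; infer_instance

def pvWitness_solve : Int × List (List String) := (1, [["O", "2", "B", "1", "B", "4"], []])

def Spec_solve (param : Int) (input : List (List String)) (out : List Int) : Prop := out = solve_alt param input
instance (param : Int) (input : List (List String)) (out : List Int) : Decidable (Spec_solve param input out) := by unfold Spec_solve; infer_instance

-- ===== CLAIM (what is proved, stated in full; the proofs are below) =====
def Claim_equal_solve : Prop := ∀ (param : Int) (input : List (List String)), Dom_solve param input → Pre_solve param input → Spec_solve param input (solve param input)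

-- ===== LEMMAS AND PROOFS =====

-- the coupling invariant between A's and B's loop states
def PvRel (a : PvStA) (b : PvStB) : Prop :=
  a.sec = b.t ∧ a.aOsec = b.t - b.bready ∧ a.aBsec = b.t - b.oready ∧
  a.Opos = b.opos ∧ a.Bpos = b.bpos ∧
  ((a.r = -1 ∧ b.color = none) ∨ (a.r = 0 ∧ b.color = some "O") ∨ (a.r = 1 ∧ b.color = some "B")) ∧
  ((a.last = none ∧ b.t = 0 ∧ b.oready = 0 ∧ b.bready = 0) ∨
   (a.last = some "O" ∧ b.oready = b.t) ∨
   (a.last = some "B" ∧ b.bready = b.t))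

-- the invariant lifted to the Option-valued loop states (none = both Pythons raise)
def PvRelO (oa : Option PvStA) (ob : Option PvStB) : Prop :=
  match oa, ob with
  | none, none => True
  | some a, some b => PvRel a b
  | _, _ => False

lemma pvStep_rel (a : PvStA) (b : PvStB) (i : String) (h : PvRel a b) :
    PvRelO (pvStepA a i) (pvStepB b i) := by
  obtain ⟨hsec, hao, hab, hop, hbp, hc, hl⟩ := h
  by_cases hO : i = "O"
  · subst hO
    simp only [pvStepA, pvStepB, PvRelO]
    exact ⟨hsec, hao, hab, hop, hbp, Or.inr (Or.inl ⟨rfl, rfl⟩), hl⟩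
  by_cases hB : i = "B"
  · subst hB
    simp only [pvStepA, pvStepB, if_neg hO, PvRelO]
    exact ⟨hsec, hao, hab, hop, hbp, Or.inr (Or.inr ⟨rfl, rfl⟩), hl⟩
  rcases hc with ⟨hr, hcol⟩ | ⟨hr, hcol⟩ | ⟨hr, hcol⟩
  · -- no color seen yet: both loops skip the token
    have h1 : ¬ (i = "O" ∨ i = "B") := by tauto
    simp only [pvStepA, pvStepB, if_neg hO, if_neg hB, if_neg h1, hr, hcol]
    norm_num [PvRelO]
    exact ⟨hsec, hao, hab, hop, hbp, Or.inl ⟨hr, hcol⟩, hl⟩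
  · -- O-move
    have h1 : ¬ (i = "O" ∨ i = "B") := by tauto
    simp only [pvStepA, pvStepB, if_neg hO, if_neg hB, if_neg h1, hr, hcol]
    cases hp : PySem.Int.ofStr? i with
    | none => simp [PvRelO]
    | some p =>
      have hd0 : 0 ≤ |p - b.opos| := abs_nonneg _
      rcases hl with ⟨hlast, ht0, ho0, hb0⟩ | ⟨hlast, hor⟩ | ⟨hlast, hbr⟩
      · have hnb : ¬ a.last = some "B" := by rw [hlast]; simp
        simp only [if_neg hnb, PvRelO, PvRel, hop]
        refine ⟨by dsimp only; omega, by dsimp only; omega, by dsimp only; omega, rfl, hbp, Or.inr (Or.inl ⟨rfl, rfl⟩),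
                Or.inr (Or.inl ⟨rfl, rfl⟩)⟩
      · have hnb : ¬ a.last = some "B" := by rw [hlast]; simp
        simp only [if_neg hnb, PvRelO, PvRel, hop]
        refine ⟨by dsimp only; omega, by dsimp only; omega, by dsimp only; omega, rfl, hbp, Or.inr (Or.inl ⟨rfl, rfl⟩),
                Or.inr (Or.inl ⟨rfl, rfl⟩)⟩
      · simp only [if_pos hlast, hop]
        by_cases h2 : a.aBsec > |p - b.opos|
        · simp only [if_pos h2]
          exact ⟨by dsimp only; omega, by dsimp only; omega, by dsimp only; omega, rfl, hbp,
                 Or.inr (Or.inl ⟨rfl, rfl⟩), Or.inr (Or.inl ⟨rfl, rfl⟩)⟩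
        · simp only [if_neg h2]
          exact ⟨by dsimp only; omega, by dsimp only; omega, by dsimp only; omega, rfl, hbp,
                 Or.inr (Or.inl ⟨rfl, rfl⟩), Or.inr (Or.inl ⟨rfl, rfl⟩)⟩
  · -- B-move
    have h1 : ¬ (i = "O" ∨ i = "B") := by tauto
    have hr0 : ¬ a.r = 0 := by rw [hr]; decide
    simp only [pvStepA, pvStepB, if_neg hO, if_neg hB, if_neg h1, hr, hcol]
    cases hp : PySem.Int.ofStr? i with
    | none => simp [PvRelO]
    | some p =>
      have hd0 : 0 ≤ |p - b.bpos| := abs_nonneg _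
      have hco : ¬ ("B" : String) = "O" := by simp
      rcases hl with ⟨hlast, ht0, ho0, hb0⟩ | ⟨hlast, hor⟩ | ⟨hlast, hbr⟩
      · have hno : ¬ a.last = some "O" := by rw [hlast]; simp
        simp only [if_neg hno, if_neg hco, PvRelO, PvRel, hbp]
        refine ⟨by dsimp only; omega, by dsimp only; omega, by dsimp only; omega, hop, rfl, Or.inr (Or.inr ⟨rfl, rfl⟩),
                Or.inr (Or.inr ⟨rfl, rfl⟩)⟩
      · simp only [if_pos hlast, if_neg hco, hbp]
        by_cases h2 : a.aOsec > |p - b.bpos|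
        · simp only [if_pos h2]
          exact ⟨by dsimp only; omega, by dsimp only; omega, by dsimp only; omega, hop, rfl,
                 Or.inr (Or.inr ⟨rfl, rfl⟩), Or.inr (Or.inr ⟨rfl, rfl⟩)⟩
        · simp only [if_neg h2]
          exact ⟨by dsimp only; omega, by dsimp only; omega, by dsimp only; omega, hop, rfl,
                 Or.inr (Or.inr ⟨rfl, rfl⟩), Or.inr (Or.inr ⟨rfl, rfl⟩)⟩
      · have hno : ¬ a.last = some "O" := by rw [hlast]; simp
        simp only [if_neg hno, if_neg hco, PvRelO, PvRel, hbp]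
        refine ⟨by dsimp only; omega, by dsimp only; omega, by dsimp only; omega, hop, rfl, Or.inr (Or.inr ⟨rfl, rfl⟩),
                Or.inr (Or.inr ⟨rfl, rfl⟩)⟩

lemma pvFold_rel (l : List String) (oa : Option PvStA) (ob : Option PvStB)
    (h : PvRelO oa ob) :
    PvRelO (l.foldl (fun acc i => acc.bind (fun st => pvStepA st i)) oa)
           (l.foldl (fun acc tok => acc.bind (fun st => pvStepB st tok)) ob) := by
  induction l generalizing oa ob with
  | nil => exact h
  | cons i l ih =>
    simp only [List.foldl]
    apply ih
    match oa, ob, h with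
    | none, none, _ => exact trivial
    | some a, some b, h => exact pvStep_rel a b i h

lemma pvRun_rel (l : List String) : PvRelO (pvRunA l) (pvRunB l) :=
  pvFold_rel l (some pvInitA) (some pvInitB)
    ⟨rfl, rfl, rfl, rfl, rfl, Or.inl ⟨rfl, rfl⟩, Or.inl ⟨rfl, rfl, rfl, rfl⟩⟩

-- ===== VERDICT (by name: the statement is the Claim_ definition above) =====
theorem solve_spec : Claim_equal_solve := by
  intro param input _ _
  unfold Spec_solve solve solve_alt
  refine List.map_congr_left ?_
  intro l _
  have h := pvRun_rel l
  rcases hA : pvRunA l with _ | a <;> rcases hB : pvRunB l with _ | b <;>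
    rw [hA, hB] at h
  · exact absurd h (by simp [PvRelO])
  · exact absurd h (by simp [PvRelO])
  · exact h.1
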